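-- pv_equiv track=rewrite | github.com/netra-systems/zen | scripts/compliance/test_fixer.py | _extract_file_header
-- ===== SOURCE A (Python) =====
-- def _extract_file_header(content: str) -> str:
--     """Extract imports and module docstring"""
--     lines = content.splitlines()
--     header_lines = []
--     in_docstring = False
--     docstring_quotes = None
--
--     for line in lines:
--         stripped = line.strip()
--
--         # Handle module docstring
--         if not in_docstring and (stripped.startswith('"""') or stripped.startswith("'''")):
--             docstring_quotes = stripped[:3]
--             in_docstring = True
--             header_lines.append(line)
--             if stripped.count(docstring_quotes) >= 2:
--                 in_docstring = False
--             continue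
--
--         if in_docstring:
--             header_lines.append(line)
--             if docstring_quotes in stripped:
--                 in_docstring = False
--             continue
--
--         # Include imports and other header elements
--         if (stripped.startswith('import ') or
--             stripped.startswith('from ') or
--             stripped.startswith('#') or
--             stripped == '' or
--             stripped.startswith('@')):
--             header_lines.append(line)
--         else:
--             break
--
--     return '\n'.join(header_lines)
-- ===== SOURCE B (Python) =====
-- def _extract_file_header(content: str) -> str:
--     """Extract imports and module docstring (two-stage: group lines into blocks, then take the header prefix)."""
--     lines = content.splitlines()
--     n = len(lines)
--     # Stage 1: partition ALL lines into tagged blocks (keep?, lines-of-block).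
--     blocks = []
--     i = 0
--     while i < n:
--         s = lines[i].strip()
--         if s.startswith('"""') or s.startswith("'''"):
--             q = s[:3]
--             j = i + 1
--             if s.count(q) < 2:
--                 while j < n and q not in lines[j].strip():
--                     j += 1
--                 if j < n:
--                     j += 1  # include the closing line
--             blocks.append((True, lines[i:j]))
--             i = j
--         else:
--             ok = (s.startswith('import ') or s.startswith('from ')
--                   or s.startswith('#') or s == '' or s.startswith('@'))
--             blocks.append((ok, [lines[i]]))
--             i += 1
--     # Stage 2: flatten the maximal prefix of keepable blocks.
--     header = []
--     for ok, blk in blocks: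
--         if not ok:
--             break
--         header.extend(blk)
--     return '\n'.join(header)
-- ===== Notes on version B (the rewrite author's own statement) =====
-- stated objective: alternative
-- what changed: Replaces A's single stateful scan (boolean in_docstring flag threaded through one loop) by two staged passes: first partition ALL lines into tagged blocks (docstring blocks consumed whole, single lines tagged keep/stop), then flatten the maximal keepable prefix of the block list.
import Mathlib
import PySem

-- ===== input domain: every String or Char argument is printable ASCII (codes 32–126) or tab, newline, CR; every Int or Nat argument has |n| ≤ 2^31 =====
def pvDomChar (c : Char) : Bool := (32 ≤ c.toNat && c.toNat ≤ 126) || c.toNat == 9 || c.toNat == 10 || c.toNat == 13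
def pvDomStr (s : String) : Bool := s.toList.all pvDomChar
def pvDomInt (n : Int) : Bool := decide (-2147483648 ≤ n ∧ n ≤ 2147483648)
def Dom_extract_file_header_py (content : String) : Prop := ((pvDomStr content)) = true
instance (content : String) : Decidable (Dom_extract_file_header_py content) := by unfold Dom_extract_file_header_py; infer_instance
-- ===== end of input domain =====

-- B replaces A's one-pass boolean state machine by two staged passes: partition all lines
-- into tagged blocks (docstring blocks / single lines), then flatten the keepable prefix
-- (objective: alternative decomposition, same cost).

-- ===== PORT A =====
-- A's for-loop over lines with state (header_lines, in_docstring, docstring_quotes)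
def extractHeaderGoA : List String → List String → Bool → String → List String
  | [], header, _, _ => header
  | line :: rest, header, inDoc, q =>
    let stripped := PySem.Str.strip line
    if !inDoc && (PySem.Str.startswith stripped "\"\"\"" || PySem.Str.startswith stripped "'''") then
      let q' := PySem.Str.slice stripped none (some 3)
      let header' := header ++ [line]
      if 2 ≤ PySem.Str.count stripped q' then
        extractHeaderGoA rest header' false q'
      else
        extractHeaderGoA rest header' true q'
    else if inDoc then
      let header' := header ++ [line]
      if PySem.Str.isIn q stripped then
        extractHeaderGoA rest header' false q
      else
        extractHeaderGoA rest header' true q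
    else if PySem.Str.startswith stripped "import " || PySem.Str.startswith stripped "from " ||
            PySem.Str.startswith stripped "#" || stripped == "" ||
            PySem.Str.startswith stripped "@" then
      extractHeaderGoA rest (header ++ [line]) inDoc q
    else
      header

def extract_file_header_py (content : String) : String :=
  PySem.Str.join "\n" (extractHeaderGoA (PySem.Str.splitlines content) [] false "")

-- ===== PORT B =====
-- Source B's inner while: scan forward to the closing line, returning (consumed slice lines[i+1:j], rest)
def docBodyB : String → List String → List String × List String
  | _, [] => ([], [])
  | q, l :: rest =>
    if PySem.Str.isIn q (PySem.Str.strip l) then ([l], rest)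
    else
      let p := docBodyB q rest
      (l :: p.1, p.2)

theorem docBodyB_len (q : String) (xs : List String) : (docBodyB q xs).2.length ≤ xs.length := by
  induction xs with
  | nil => simp [docBodyB]
  | cons l rest ih =>
    simp only [docBodyB]
    split
    · simp
    · simpa using Nat.le_succ_of_le ih

-- Source B stage 1: partition all lines into tagged blocks
def blocksB : List String → List (Bool × List String)
  | [] => []
  | line :: rest =>
    let s := PySem.Str.strip line
    if PySem.Str.startswith s "\"\"\"" || PySem.Str.startswith s "'''" then
      let q := PySem.Str.slice s none (some 3)
      if PySem.Str.count s q < 2 then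
        let p := docBodyB q rest
        (true, line :: p.1) :: blocksB p.2
      else
        (true, [line]) :: blocksB rest
    else
      let ok := PySem.Str.startswith s "import " || PySem.Str.startswith s "from " ||
                PySem.Str.startswith s "#" || s == "" || PySem.Str.startswith s "@"
      (ok, [line]) :: blocksB rest
  termination_by xs => xs.length
  decreasing_by
  · exact Nat.lt_succ_of_le (docBodyB_len _ rest)
  · simp
  · simp

-- Source B stage 2: flatten the maximal keepable prefix of blocks
def takeHeaderB : List (Bool × List String) → List String
  | [] => []
  | (ok, blk) :: rest => if ok then blk ++ takeHeaderB rest else []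

def extract_file_header_py_alt (content : String) : String :=
  PySem.Str.join "\n" (takeHeaderB (blocksB (PySem.Str.splitlines content)))

-- ===== PRECONDITION & SPEC =====
def Spec_extract_file_header_py (content : String) (out : String) : Prop := out = extract_file_header_py_alt content
instance (content : String) (out : String) : Decidable (Spec_extract_file_header_py content out) := by unfold Spec_extract_file_header_py; infer_instance

-- ===== CLAIM (what is proved, stated in full; the proofs are below) =====
def Claim_equal_extract_file_header_py : Prop := ∀ (content : String), Dom_extract_file_header_py content → Spec_extract_file_header_py content (extract_file_header_py content)

-- ===== LEMMAS AND PROOFS =====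
-- A's loop from the outer state equals the flattened keepable prefix of B's blocks;
-- from the in-docstring state it equals the docstring body followed by the same on the rest.
theorem extractHeaderGoA_eq (n : ℕ) : ∀ (lines : List String), lines.length ≤ n →
    (∀ header q, extractHeaderGoA lines header false q = header ++ takeHeaderB (blocksB lines)) ∧
    (∀ header q, extractHeaderGoA lines header true q =
        header ++ (docBodyB q lines).1 ++ takeHeaderB (blocksB (docBodyB q lines).2)) := by
  induction n with
  | zero =>
    intro lines hlen
    have : lines = [] := List.length_eq_zero_iff.mp (Nat.le_zero.mp hlen)
    subst this
    simp [extractHeaderGoA, blocksB, takeHeaderB, docBodyB]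
  | succ n ih =>
    intro lines hlen
    cases lines with
    | nil => simp [extractHeaderGoA, blocksB, takeHeaderB, docBodyB]
    | cons line rest =>
      have hrest : rest.length ≤ n := by simpa using hlen
      constructor
      · intro header q
        simp only [extractHeaderGoA, Bool.not_false, Bool.true_and]
        rw [blocksB]
        by_cases hds : (PySem.Str.startswith (PySem.Str.strip line) "\"\"\"" ||
            PySem.Str.startswith (PySem.Str.strip line) "'''") = true
        · rw [if_pos hds]
          simp only [if_pos hds]
          by_cases hc : 2 ≤ PySem.Str.count (PySem.Str.strip line)
              (PySem.Str.slice (PySem.Str.strip line) none (some 3))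
          · rw [if_pos hc, if_neg (by omega), (ih rest hrest).1]
            simp [takeHeaderB]
          · rw [if_neg hc, if_pos (by omega), (ih rest hrest).2]
            simp [takeHeaderB]
        · rw [if_neg hds]
          simp only [if_neg hds, if_neg (by simp : ¬ (false = true))]
          split
          · rw [(ih rest hrest).1]
            simp_all [takeHeaderB]
          · simp_all [takeHeaderB]
      · intro header q
        rw [extractHeaderGoA, docBodyB]
        by_cases hin : PySem.Str.isIn q (PySem.Str.strip line) = true
        · simp only [hin, Bool.not_true, Bool.false_and, Bool.false_eq_true, if_false, if_true,
            (ih rest hrest).1]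
        · simp only [hin, Bool.not_true, Bool.false_and, Bool.false_eq_true, if_false, if_true,
            (ih rest hrest).2]
          simp

-- ===== VERDICT (by name: the statement is the Claim_ definition above) =====
theorem extract_file_header_py_spec : Claim_equal_extract_file_header_py := by
  intro content _
  unfold Spec_extract_file_header_py extract_file_header_py extract_file_header_py_alt
  rw [(extractHeaderGoA_eq (PySem.Str.splitlines content).length
    (PySem.Str.splitlines content) le_rfl).1 [] ""]
  simp
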